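-- pv_equiv track=rewrite | github.com/blacula3000/Newstratbot | strat_trading_bot.py | has_full_continuity
-- ===== SOURCE A (Python) =====
-- from typing import Dict, List, Tuple, Optional
--
-- def has_full_continuity(continuity: Dict[str, str]) -> Tuple[bool, str]:
--     """Check if all timeframes align"""
--     valid_trends = [v for v in continuity.values() if v not in ["NO_DATA", "ERROR", "NEUTRAL"]]
--
--     if not valid_trends:
--         return False, "NEUTRAL"
--
--     # Check if all valid trends are the same
--     if all(trend == "BULLISH" for trend in valid_trends):
--         return True, "BULLISH"
--     elif all(trend == "BEARISH" for trend in valid_trends):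
--         return True, "BEARISH"
--     else:
--         return False, "MIXED"
-- ===== SOURCE B (Python) =====
-- def has_full_continuity(continuity):
--     """Check if all timeframes align (single pass, three flags)."""
--     bull = bear = other = False
--     for v in continuity.values():
--         if v in ("NO_DATA", "ERROR", "NEUTRAL"):
--             continue
--         elif v == "BULLISH":
--             bull = True
--         elif v == "BEARISH":
--             bear = True
--         else:
--             other = True
--     if not (bull or bear or other):
--         return False, "NEUTRAL"
--     if other or (bull and bear):
--         return False, "MIXED"
--     return (True, "BULLISH") if bull else (True, "BEARISH")
-- ===== Notes on version B (the rewrite author's own statement) =====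
-- stated objective: alternative
-- what changed: B makes one pass over the values maintaining three boolean flags (saw BULLISH / saw BEARISH / saw other valid trend) and decides from the flags, instead of A's materialised filtered list and two subsequent all() scans.
import Mathlib
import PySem

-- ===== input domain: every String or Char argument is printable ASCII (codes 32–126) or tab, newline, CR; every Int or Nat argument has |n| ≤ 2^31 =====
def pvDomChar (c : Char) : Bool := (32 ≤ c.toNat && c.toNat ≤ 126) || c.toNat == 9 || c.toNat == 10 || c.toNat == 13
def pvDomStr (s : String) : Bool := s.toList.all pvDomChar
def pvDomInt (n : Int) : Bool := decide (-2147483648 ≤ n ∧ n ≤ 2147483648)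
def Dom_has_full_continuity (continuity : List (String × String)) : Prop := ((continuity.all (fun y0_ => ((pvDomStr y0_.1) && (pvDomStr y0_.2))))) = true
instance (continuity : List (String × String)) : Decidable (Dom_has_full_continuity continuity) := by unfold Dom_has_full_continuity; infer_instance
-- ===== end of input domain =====

-- B replaces A's filtered list and two all() scans by a single pass keeping three boolean flags; same values everywhere.

-- ===== PORT A =====
-- A: filter the dict's values to the valid trends, then two all() scans.
def has_full_continuity (continuity : List (String × String)) : Bool × String :=
  let valid_trends := ((PySem.Dict.ofList continuity).values).filter
      (fun v => decide (v ∉ ["NO_DATA", "ERROR", "NEUTRAL"]))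
  if valid_trends = [] then (false, "NEUTRAL")
  else if valid_trends.all (fun trend => trend == "BULLISH") then (true, "BULLISH")
  else if valid_trends.all (fun trend => trend == "BEARISH") then (true, "BEARISH")
  else (false, "MIXED")

-- ===== PORT B =====
-- B: one fold over the values maintaining (bull, bear, other) flags, then decide from the flags.
def has_full_continuity_alt (continuity : List (String × String)) : Bool × String :=
  let st := ((PySem.Dict.ofList continuity).values).foldl
    (fun (st : Bool × Bool × Bool) v =>
      if v ∈ ["NO_DATA", "ERROR", "NEUTRAL"] then st
      else if v == "BULLISH" then (true, st.2.1, st.2.2)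
      else if v == "BEARISH" then (st.1, true, st.2.2)
      else (st.1, st.2.1, true))
    (false, false, false)
  if !(st.1 || st.2.1 || st.2.2) then (false, "NEUTRAL")
  else if st.2.2 || (st.1 && st.2.1) then (false, "MIXED")
  else if st.1 then (true, "BULLISH")
  else (true, "BEARISH")

-- ===== PRECONDITION & SPEC =====
def Spec_has_full_continuity (continuity : List (String × String)) (out : Bool × String) : Prop := out = has_full_continuity_alt continuity
instance (continuity : List (String × String)) (out : Bool × String) : Decidable (Spec_has_full_continuity continuity out) := by unfold Spec_has_full_continuity; infer_instance

-- ===== CLAIM (what is proved, stated in full; the proofs are below) =====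
def Claim_equal_has_full_continuity : Prop := ∀ (continuity : List (String × String)), Dom_has_full_continuity continuity → Spec_has_full_continuity continuity (has_full_continuity continuity)

-- ===== LEMMAS AND PROOFS =====

-- the fold computes the three flags as facts about A's filtered list
lemma fold_flags (vs : List String) (b r o : Bool) :
    vs.foldl
      (fun (st : Bool × Bool × Bool) v =>
        if v ∈ ["NO_DATA", "ERROR", "NEUTRAL"] then st
        else if v == "BULLISH" then (true, st.2.1, st.2.2)
        else if v == "BEARISH" then (st.1, true, st.2.2)
        else (st.1, st.2.1, true))
      (b, r, o) =
    (b || decide ("BULLISH" ∈ vs.filter (fun v => decide (v ∉ ["NO_DATA", "ERROR", "NEUTRAL"]))),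
     r || decide ("BEARISH" ∈ vs.filter (fun v => decide (v ∉ ["NO_DATA", "ERROR", "NEUTRAL"]))),
     o || decide (∃ x ∈ vs.filter (fun v => decide (v ∉ ["NO_DATA", "ERROR", "NEUTRAL"])),
            x ≠ "BULLISH" ∧ x ≠ "BEARISH")) := by
  induction vs generalizing b r o with
  | nil => simp
  | cons v vs ih =>
    by_cases hs : v ∈ ["NO_DATA", "ERROR", "NEUTRAL"]
    · have hd : decide (v ∉ ["NO_DATA", "ERROR", "NEUTRAL"]) = false := by simp [hs]
      simp only [List.foldl_cons, if_pos hs, List.filter_cons, hd]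
      simpa using ih b r o
    · have hd : decide (v ∉ ["NO_DATA", "ERROR", "NEUTRAL"]) = true := by simp [hs]
      by_cases hb : v = "BULLISH"
      · subst hb
        simp only [List.foldl_cons, if_neg hs, beq_self_eq_true, if_true]
        rw [ih, List.filter_cons, if_pos hd]
        simp only [Prod.mk.injEq]
        refine ⟨?_, ?_, ?_⟩
        · simp
        · congr 1; rw [decide_eq_decide]; simp
        · congr 1; rw [decide_eq_decide]; simp
      · by_cases hr : v = "BEARISH"
        · subst hr
          have hbb : (("BEARISH" : String) == "BULLISH") = false := by decide
          simp only [List.foldl_cons, if_neg hs, hbb, Bool.false_eq_true, if_false,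
            beq_self_eq_true, if_true]
          rw [ih, List.filter_cons, if_pos hd]
          simp only [Prod.mk.injEq]
          refine ⟨?_, ?_, ?_⟩
          · congr 1; rw [decide_eq_decide]; simp
          · simp
          · congr 1; rw [decide_eq_decide]; simp
        · have hvb : (v == "BULLISH") = false := by simp [hb]
          have hvr : (v == "BEARISH") = false := by simp [hr]
          simp only [List.foldl_cons, if_neg hs, hvb, hvr, Bool.false_eq_true, if_false]
          rw [ih, List.filter_cons, if_pos hd]
          simp only [Prod.mk.injEq]
          refine ⟨?_, ?_, ?_⟩
          · congr 1; rw [decide_eq_decide]; simp [List.mem_cons, Ne.symm hb]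
          · congr 1; rw [decide_eq_decide]; simp [List.mem_cons, Ne.symm hr]
          · simp
            exact Or.inr (Or.inl ⟨hb, hr⟩)

-- ===== VERDICT (by name: the statement is the Claim_ definition above) =====
theorem has_full_continuity_spec : Claim_equal_has_full_continuity := by
  intro continuity _
  unfold Spec_has_full_continuity has_full_continuity has_full_continuity_alt
  rw [fold_flags]
  set vs := (PySem.Dict.ofList continuity).values with hvs
  set f := vs.filter (fun v => decide (v ∉ ["NO_DATA", "ERROR", "NEUTRAL"])) with hf
  by_cases hnil : f = []
  · simp [hnil]
  · obtain ⟨y, hy⟩ := List.exists_mem_of_ne_nil _ hnil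
    by_cases hB : f.all (fun t => t == "BULLISH")
    · have hmem : ("BULLISH" : String) ∈ f := by
        have := (List.all_eq_true.mp hB) y hy
        simp at this; rwa [this] at hy
      have hnotbear : ¬ ("BEARISH" : String) ∈ f := by
        intro h; have := (List.all_eq_true.mp hB) _ h; simp at this
      have hnototh : ¬ (∃ x ∈ f, x ≠ "BULLISH" ∧ x ≠ "BEARISH") := by
        rintro ⟨x, hx, hx1, _⟩
        have := (List.all_eq_true.mp hB) x hx; simp at this; exact hx1 this
      simp [hnil, hB, hmem, hnotbear, hnototh]
    · by_cases hR : f.all (fun t => t == "BEARISH")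
      · have hmem : ("BEARISH" : String) ∈ f := by
          have := (List.all_eq_true.mp hR) y hy
          simp at this; rwa [this] at hy
        have hnotbull : ¬ ("BULLISH" : String) ∈ f := by
          intro h; have := (List.all_eq_true.mp hR) _ h; simp at this
        have hnototh : ¬ (∃ x ∈ f, x ≠ "BULLISH" ∧ x ≠ "BEARISH") := by
          rintro ⟨x, hx, _, hx2⟩
          have := (List.all_eq_true.mp hR) x hx; simp at this; exact hx2 this
        simp [hnil, hB, hR, hmem, hnotbull, hnototh]
      · -- MIXED: the other flag is set, or both the bull and bear flags are
        have hB' : ∃ u ∈ f, u ≠ "BULLISH" := by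
          simp only [List.all_eq_true, beq_iff_eq] at hB; push_neg at hB; exact hB
        have hR' : ∃ w ∈ f, w ≠ "BEARISH" := by
          simp only [List.all_eq_true, beq_iff_eq] at hR; push_neg at hR; exact hR
        have hmix : (∃ x ∈ f, x ≠ "BULLISH" ∧ x ≠ "BEARISH") ∨
            (("BULLISH" : String) ∈ f ∧ ("BEARISH" : String) ∈ f) := by
          by_cases hoth : ∃ x ∈ f, x ≠ "BULLISH" ∧ x ≠ "BEARISH"
          · exact Or.inl hoth
          · push_neg at hoth
            obtain ⟨u, hu, hu1⟩ := hB'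
            obtain ⟨w, hw, hw1⟩ := hR'
            have hbear : ("BEARISH" : String) ∈ f := (hoth u hu hu1) ▸ hu
            have hbull : ("BULLISH" : String) ∈ f := by
              by_cases hwb : w = "BULLISH"
              · exact hwb ▸ hw
              · exact absurd (hoth w hw hwb) hw1
            exact Or.inr ⟨hbull, hbear⟩
        rcases hmix with hoth | ⟨h1, h2⟩
        · simp [hnil, hB, hR, hoth]
        · simp [hnil, hB, hR, h1, h2]
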